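-- pv_equiv track=rewrite | github.com/Philosoft/leetcode-practice-python | 2444__count_subarrays_with_fixed_bounds.py | countSubarraysBrute
-- ===== SOURCE A (Python) =====
-- from typing import List
--
-- def countSubarraysBrute(nums: List[int], minK: int, maxK: int) -> int:
--     count = 0
--     left = 0
--     while left < len(nums):
--         # find a start of a window
--         while left < len(nums) and not minK <= nums[left] <= maxK:
--             left += 1
--
--         if left == len(nums):
--             break
--
--         # left is a start of a *possible* window (at least size 1)
--         # find a right end of a window.
--         right = left
--         found_min = found_max = nums[left] == minK == maxK
--         while right < len(nums) and minK <= nums[right] <= maxK: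
--             if not found_min and nums[right] == minK:
--                 found_min = True
--
--             if not found_max and nums[right] == maxK:
--                 found_max = True
--
--             right += 1
--             if found_min and found_max:
--                 count += 1  # each step gives us a new subarray
--
--         left += 1
--
--     return count
-- ===== SOURCE B (Python) =====
-- from typing import List
--
-- def countSubarraysBrute(nums: List[int], minK: int, maxK: int) -> int:
--     # Sliding window: for each right end i, the valid left ends are
--     # last_bad < l <= min(last_min, last_max).
--     count = 0
--     last_min = last_max = last_bad = -1
--     for i, x in enumerate(nums):
--         if not (minK <= x <= maxK):
--             last_bad = i
--         if x == minK:
--             last_min = i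
--         if x == maxK:
--             last_max = i
--         count += max(0, min(last_min, last_max) - last_bad)
--     return count
-- ===== Notes on version B (the rewrite author's own statement) =====
-- stated objective: alternative
-- what changed: Replaced the nested rescan (for each window start, re-scan right until both bounds are seen) by a single left-to-right sliding-window pass that maintains the last positions of minK, maxK and of an out-of-bounds element, adding min(last_min,last_max)-last_bad valid window starts per right end.
import Mathlib
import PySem

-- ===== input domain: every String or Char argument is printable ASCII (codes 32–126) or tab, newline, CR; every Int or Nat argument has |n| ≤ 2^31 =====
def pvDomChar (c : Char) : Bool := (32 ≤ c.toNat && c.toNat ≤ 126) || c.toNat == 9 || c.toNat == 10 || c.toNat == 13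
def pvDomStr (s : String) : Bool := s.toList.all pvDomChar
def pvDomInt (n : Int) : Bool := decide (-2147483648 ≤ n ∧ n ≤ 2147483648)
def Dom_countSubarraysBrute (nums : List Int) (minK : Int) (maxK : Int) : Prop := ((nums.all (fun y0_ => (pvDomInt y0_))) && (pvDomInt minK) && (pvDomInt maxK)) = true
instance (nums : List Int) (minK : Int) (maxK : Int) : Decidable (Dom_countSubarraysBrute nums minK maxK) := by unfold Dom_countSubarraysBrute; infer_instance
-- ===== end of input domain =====

-- B replaces A's nested rescans by a single sliding-window pass keeping the last indices of
-- minK, maxK and of an out-of-bounds element (objective: alternative algorithm).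

-- ===== PORT A =====
-- inner skip loop: "while left < len(nums) and not minK <= nums[left] <= maxK: left += 1"
-- (index access is always guarded by 'left < len(nums)', so getD is exact here)
def pvSkipA (nums : List Int) (minK : Int) (maxK : Int) (left : Nat) : Nat :=
  if h : left < nums.length ∧ ¬(minK ≤ nums.getD left 0 ∧ nums.getD left 0 ≤ maxK) then
    pvSkipA nums minK maxK (left + 1)
  else left
termination_by nums.length - left
decreasing_by omega

-- the port's outer loop cites this for termination
theorem pvSkipA_ge (nums : List Int) (minK maxK : Int) (left : Nat) :
    left ≤ pvSkipA nums minK maxK left := by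
  induction left using pvSkipA.induct nums minK maxK with
  | case1 l h ih => rw [pvSkipA, dif_pos h]; omega
  | case2 l h => rw [pvSkipA, dif_neg h]

-- inner counting loop: "while right < len(nums) and minK <= nums[right] <= maxK: …"
def pvInnerA (nums : List Int) (minK : Int) (maxK : Int) (right : Nat) (fm fM : Bool) (count : Int) : Int :=
  if h : right < nums.length ∧ (minK ≤ nums.getD right 0 ∧ nums.getD right 0 ≤ maxK) then
    let fm' := fm || decide (nums.getD right 0 = minK)
    let fM' := fM || decide (nums.getD right 0 = maxK)
    pvInnerA nums minK maxK (right + 1) fm' fM' (if fm' && fM' then count + 1 else count)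
  else count
termination_by nums.length - right
decreasing_by omega

-- outer loop: "while left < len(nums): …"
def pvOuterA (nums : List Int) (minK : Int) (maxK : Int) (left : Nat) (count : Int) : Int :=
  if h : left < nums.length then
    let l := pvSkipA nums minK maxK left
    if l = nums.length then count
    else
      pvOuterA nums minK maxK (l + 1)
        (pvInnerA nums minK maxK l
          (decide (nums.getD l 0 = minK ∧ minK = maxK))
          (decide (nums.getD l 0 = minK ∧ minK = maxK)) count)
  else count
termination_by nums.length - left
decreasing_by have := pvSkipA_ge nums minK maxK left; omega

def countSubarraysBrute (nums : List Int) (minK : Int) (maxK : Int) : Int :=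
  pvOuterA nums minK maxK 0 0

-- ===== PORT B =====
-- loop body of Source B's single for-loop over enumerate(nums); state = (count, last_min, last_max, last_bad)
def pvStepB (minK : Int) (maxK : Int) (s : Int × Int × Int × Int) (p : Int × Int) : Int × Int × Int × Int :=
  let lb := if ¬(minK ≤ p.2 ∧ p.2 ≤ maxK) then p.1 else s.2.2.2
  let lm := if p.2 = minK then p.1 else s.2.1
  let lM := if p.2 = maxK then p.1 else s.2.2.1
  (s.1 + max 0 (min lm lM - lb), lm, lM, lb)

def countSubarraysBrute_alt (nums : List Int) (minK : Int) (maxK : Int) : Int :=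
  ((PySem.List.enumerate nums 0).foldl (pvStepB minK maxK) (0, -1, -1, -1)).1

-- ===== PRECONDITION & SPEC =====
def Spec_countSubarraysBrute (nums : List Int) (minK : Int) (maxK : Int) (out : Int) : Prop := out = countSubarraysBrute_alt nums minK maxK
instance (nums : List Int) (minK : Int) (maxK : Int) (out : Int) : Decidable (Spec_countSubarraysBrute nums minK maxK out) := by unfold Spec_countSubarraysBrute; infer_instance

-- ===== CLAIM (what is proved, stated in full; the proofs are below) =====
def Claim_equal_countSubarraysBrute : Prop := ∀ (nums : List Int) (minK : Int) (maxK : Int), Dom_countSubarraysBrute nums minK maxK → Spec_countSubarraysBrute nums minK maxK (countSubarraysBrute nums minK maxK)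

-- ===== LEMMAS AND PROOFS =====

-- bounded quantifiers over nums[a..b] as Bool
def pvAllB (nums : List Int) (minK maxK : Int) (a b : Nat) : Bool :=
  decide (∀ i ∈ Finset.Icc a b, minK ≤ nums.getD i 0 ∧ nums.getD i 0 ≤ maxK)
def pvExB (nums : List Int) (K : Int) (a b : Nat) : Bool :=
  decide (∃ i ∈ Finset.Icc a b, nums.getD i 0 = K)

-- P l r: the subarray nums[l..r] is inside [minK,maxK] and contains both minK and maxK
def pvPb (nums : List Int) (minK maxK : Int) (l r : Nat) : Bool :=
  pvAllB nums minK maxK l r && pvExB nums minK l r && pvExB nums maxK l r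

-- number of good right ends for a fixed left end l
def pvH (nums : List Int) (minK maxK : Int) (l : Nat) : Nat :=
  ((Finset.Ico l nums.length).filter (fun r => pvPb nums minK maxK l r = true)).card

-- number of good left ends for a fixed right end r
def pvGr (nums : List Int) (minK maxK : Int) (r : Nat) : Nat :=
  ((Finset.range (r + 1)).filter (fun l => pvPb nums minK maxK l r = true)).card

-- last index j < i with q j, or -1
def pvLast (q : Nat → Bool) : Nat → Int
  | 0 => -1
  | i + 1 => if q i then (i : Int) else pvLast q i

theorem pvLast_lt (q : Nat → Bool) (i : Nat) : pvLast q i < (i : Int) := by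
  induction i with
  | zero => simp [pvLast]
  | succ i ih =>
    simp only [pvLast]
    split
    · push_cast; omega
    · push_cast; omega

theorem pvLast_ge (q : Nat → Bool) (i : Nat) : -1 ≤ pvLast q i := by
  induction i with
  | zero => simp [pvLast]
  | succ i ih => simp only [pvLast]; split <;> omega

theorem pvLast_ge_of (q : Nat → Bool) (i j : Nat) (hj : j < i) (hq : q j = true) :
    (j : Int) ≤ pvLast q i := by
  induction i with
  | zero => omega
  | succ i ih =>
    simp only [pvLast]
    by_cases hji : j = i
    · subst hji; simp [hq]
    · have := ih (by omega)
      split <;> [push_cast; skip] <;> omega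

theorem pvLast_mem (q : Nat → Bool) (i : Nat) (h : 0 ≤ pvLast q i) :
    ∃ j, j < i ∧ q j = true ∧ (j : Int) = pvLast q i := by
  induction i with
  | zero => simp [pvLast] at h
  | succ i ih =>
    simp only [pvLast] at h ⊢
    by_cases hq : q i = true
    · exact ⟨i, by omega, hq, by simp [hq]⟩
    · rw [if_neg hq] at h ⊢
      obtain ⟨j, hj1, hj2, hj3⟩ := ih h
      exact ⟨j, by omega, hj2, hj3⟩

-- A's inner loop counts the good right ends from position r onward, given the flags
theorem pvInnerA_eq (nums : List Int) (minK maxK : Int) :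
    ∀ r fm fM c, pvInnerA nums minK maxK r fm fM c =
      c + ((Finset.Ico r nums.length).filter (fun r' =>
        (pvAllB nums minK maxK r r' &&
         (fm || pvExB nums minK r r') &&
         (fM || pvExB nums maxK r r')) = true)).card := by
  suffices h : ∀ (k r : Nat), nums.length ≤ r + k → ∀ (fm fM : Bool) (c : Int),
      pvInnerA nums minK maxK r fm fM c =
      c + ((Finset.Ico r nums.length).filter (fun r' =>
        (pvAllB nums minK maxK r r' &&
         (fm || pvExB nums minK r r') &&
         (fM || pvExB nums maxK r r')) = true)).card by
    intro r fm fM c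
    exact h nums.length r (by omega) fm fM c
  intro k
  induction k with
  | zero =>
    intro r hk fm fM c
    rw [pvInnerA, dif_neg (by omega)]
    rw [Finset.Ico_eq_empty (by omega)]
    simp
  | succ k ih =>
    intro r hk fm fM c
    rw [pvInnerA]
    by_cases h : r < nums.length ∧ (minK ≤ nums.getD r 0 ∧ nums.getD r 0 ≤ maxK)
    · rw [dif_pos h]
      show pvInnerA nums minK maxK (r + 1)
          (fm || decide (nums.getD r 0 = minK)) (fM || decide (nums.getD r 0 = maxK))
          (if (fm || decide (nums.getD r 0 = minK)) && (fM || decide (nums.getD r 0 = maxK))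
            then c + 1 else c) = _
      rw [ih (r + 1) (by omega)]
      have hIns : Finset.Ico r nums.length = insert r (Finset.Ico (r + 1) nums.length) := by
        ext j
        simp only [Finset.mem_Ico, Finset.mem_insert]
        omega
      rw [hIns, Finset.filter_insert]
      have hIcc : ∀ r' : Nat, r + 1 ≤ r' → Finset.Icc r r' = insert r (Finset.Icc (r + 1) r') := by
        intro r' hr'; ext j
        simp only [Finset.mem_Icc, Finset.mem_insert]
        omega
      have hcong : (Finset.Ico (r + 1) nums.length).filter (fun r' =>
            (pvAllB nums minK maxK r r' &&
             (fm || pvExB nums minK r r') &&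
             (fM || pvExB nums maxK r r')) = true) =
          (Finset.Ico (r + 1) nums.length).filter (fun r' =>
            (pvAllB nums minK maxK (r + 1) r' &&
             ((fm || decide (nums.getD r 0 = minK)) || pvExB nums minK (r + 1) r') &&
             ((fM || decide (nums.getD r 0 = maxK)) || pvExB nums maxK (r + 1) r')) = true) := by
        refine Finset.filter_congr fun r' hr' => ?_
        have hr1 : r + 1 ≤ r' := (Finset.mem_Ico.mp hr').1
        simp only [pvAllB, pvExB, Bool.and_eq_true, Bool.or_eq_true, decide_eq_true_eq]
        rw [hIcc r' hr1]
        simp only [Finset.forall_mem_insert, Finset.exists_mem_insert]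
        constructor
        · rintro ⟨⟨⟨-, hall⟩, hm⟩, hM⟩
          exact ⟨⟨hall, by tauto⟩, by tauto⟩
        · rintro ⟨⟨hall, hm⟩, hM⟩
          exact ⟨⟨⟨h.2, hall⟩, by tauto⟩, by tauto⟩
      rw [hcong]
      have hself : ((pvAllB nums minK maxK r r &&
          (fm || pvExB nums minK r r) &&
          (fM || pvExB nums maxK r r)) = true) ↔
          (((fm || decide (nums.getD r 0 = minK)) && (fM || decide (nums.getD r 0 = maxK))) = true) := by
        simp only [pvAllB, pvExB, Finset.Icc_self, Bool.and_eq_true, Bool.or_eq_true,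
          decide_eq_true_eq, Finset.mem_singleton, forall_eq, exists_eq_left]
        constructor
        · rintro ⟨⟨-, hm⟩, hM⟩; exact ⟨hm, hM⟩
        · rintro ⟨hm, hM⟩; exact ⟨⟨h.2, hm⟩, hM⟩
      by_cases hf : ((fm || decide (nums.getD r 0 = minK)) && (fM || decide (nums.getD r 0 = maxK))) = true
      · rw [if_pos hf, if_pos (hself.mpr hf), Finset.card_insert_of_notMem (fun hmem => by
          have := Finset.mem_Ico.mp (Finset.mem_of_mem_filter r hmem)
          omega)]
        push_cast
        ring
      · rw [if_neg hf, if_neg (fun hc => hf (hself.mp hc))]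
    · rw [dif_neg h]
      have hempty : (Finset.Ico r nums.length).filter (fun r' =>
          (pvAllB nums minK maxK r r' &&
           (fm || pvExB nums minK r r') &&
           (fM || pvExB nums maxK r r')) = true) = ∅ := by
        rw [Finset.filter_eq_empty_iff]
        intro r' hr'
        have hr1 := Finset.mem_Ico.mp hr'
        simp only [pvAllB, pvExB, Bool.and_eq_true, Bool.or_eq_true, decide_eq_true_eq]
        rintro ⟨⟨hall, -⟩, -⟩
        exact h ⟨by omega, hall r (Finset.mem_Icc.mpr (by omega))⟩
      rw [hempty]
      simp

-- called with in-bounds l and the chained-comparison flags, the inner loop computes pvH l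
theorem pvInnerA_H (nums : List Int) (minK maxK : Int) (l : Nat) (c : Int)
    (_hl : l < nums.length) (hin : minK ≤ nums.getD l 0 ∧ nums.getD l 0 ≤ maxK) :
    pvInnerA nums minK maxK l
      (decide (nums.getD l 0 = minK ∧ minK = maxK))
      (decide (nums.getD l 0 = minK ∧ minK = maxK)) c = c + pvH nums minK maxK l := by
  rw [pvInnerA_eq]
  unfold pvH
  have hfc : (Finset.Ico l nums.length).filter (fun r' =>
      (pvAllB nums minK maxK l r' &&
       (decide (nums.getD l 0 = minK ∧ minK = maxK) || pvExB nums minK l r') &&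
       (decide (nums.getD l 0 = minK ∧ minK = maxK) || pvExB nums maxK l r')) = true) =
      (Finset.Ico l nums.length).filter (fun r' => pvPb nums minK maxK l r' = true) := by
    refine Finset.filter_congr fun r' hr' => ?_
    have hl' : l ≤ r' := (Finset.mem_Ico.mp hr').1
    simp only [pvPb, pvAllB, pvExB, Bool.and_eq_true, Bool.or_eq_true, decide_eq_true_eq]
    by_cases hc : (nums.getD l 0 = minK ∧ minK = maxK)
    · have hm : ∃ i ∈ Finset.Icc l r', nums.getD i 0 = minK :=
        ⟨l, Finset.mem_Icc.mpr ⟨le_refl l, hl'⟩, hc.1⟩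
      have hM : ∃ i ∈ Finset.Icc l r', nums.getD i 0 = maxK :=
        ⟨l, Finset.mem_Icc.mpr ⟨le_refl l, hl'⟩, by rw [← hc.2]; exact hc.1⟩
      tauto
    · tauto
  rw [hfc]

theorem pvH_zero (nums : List Int) (minK maxK : Int) (l : Nat)
    (h : ¬(minK ≤ nums.getD l 0 ∧ nums.getD l 0 ≤ maxK)) : pvH nums minK maxK l = 0 := by
  unfold pvH
  rw [Finset.card_eq_zero, Finset.filter_eq_empty_iff]
  intro r hr
  simp only [pvPb, pvAllB, pvExB, Bool.and_eq_true, decide_eq_true_eq]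
  rintro ⟨⟨hall, -⟩, -⟩
  exact h (hall l (Finset.mem_Icc.mpr ⟨le_refl l, (Finset.mem_Ico.mp hr).1⟩))

theorem pvSkipA_spec (nums : List Int) (minK maxK : Int) (left : Nat) :
    (∀ j, left ≤ j → j < pvSkipA nums minK maxK left → ¬(minK ≤ nums.getD j 0 ∧ nums.getD j 0 ≤ maxK)) ∧
    ¬(pvSkipA nums minK maxK left < nums.length ∧ ¬(minK ≤ nums.getD (pvSkipA nums minK maxK left) 0 ∧ nums.getD (pvSkipA nums minK maxK left) 0 ≤ maxK)) := by
  induction left using pvSkipA.induct nums minK maxK with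
  | case1 l h ih =>
    rw [pvSkipA, dif_pos h]
    refine ⟨fun j hj1 hj2 => ?_, ih.2⟩
    by_cases hjl : j = l
    · subst hjl; exact h.2
    · exact ih.1 j (by omega) hj2
  | case2 l h => rw [pvSkipA, dif_neg h]; exact ⟨fun j hj1 hj2 => by omega, h⟩

theorem pvSkipA_le (nums : List Int) (minK maxK : Int) (left : Nat) (h : left ≤ nums.length) :
    pvSkipA nums minK maxK left ≤ nums.length := by
  induction left using pvSkipA.induct nums minK maxK with
  | case1 l hc ih => rw [pvSkipA, dif_pos hc]; exact ih (by omega)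
  | case2 l hc => rw [pvSkipA, dif_neg hc]; exact h

-- A's outer loop sums pvH over the remaining left ends
theorem pvOuterA_eq (nums : List Int) (minK maxK : Int) :
    ∀ left c, pvOuterA nums minK maxK left c =
      c + ∑ l ∈ Finset.Ico left nums.length, (pvH nums minK maxK l : Int) := by
  suffices h : ∀ (k left : Nat), nums.length ≤ left + k → ∀ c : Int,
      pvOuterA nums minK maxK left c =
      c + ∑ l ∈ Finset.Ico left nums.length, (pvH nums minK maxK l : Int) by
    intro left c
    exact h nums.length left (by omega) c
  intro k
  induction k with
  | zero =>
    intro left hk c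
    rw [pvOuterA, dif_neg (by omega)]
    rw [Finset.Ico_eq_empty (by omega)]
    simp
  | succ k ih =>
    intro left hk c
    by_cases hl : left < nums.length
    · rw [pvOuterA, dif_pos hl]
      show (if pvSkipA nums minK maxK left = nums.length then c
            else pvOuterA nums minK maxK (pvSkipA nums minK maxK left + 1)
              (pvInnerA nums minK maxK (pvSkipA nums minK maxK left)
                (decide (nums.getD (pvSkipA nums minK maxK left) 0 = minK ∧ minK = maxK))
                (decide (nums.getD (pvSkipA nums minK maxK left) 0 = minK ∧ minK = maxK)) c)) = _
      set s := pvSkipA nums minK maxK left with hs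
      have hge : left ≤ s := pvSkipA_ge nums minK maxK left
      have hle : s ≤ nums.length := pvSkipA_le nums minK maxK left (by omega)
      have hspec := pvSkipA_spec nums minK maxK left
      have hzero : ∀ l' ∈ Finset.Ico left s, (pvH nums minK maxK l' : Int) = 0 := by
        intro l' hl'
        rw [Finset.mem_Ico] at hl'
        rw [pvH_zero nums minK maxK l' (hspec.1 l' hl'.1 hl'.2)]
        simp
      by_cases hsn : s = nums.length
      · rw [if_pos hsn]
        rw [← Finset.sum_Ico_consecutive _ hge hle, Finset.sum_eq_zero hzero, hsn]
        simp
      · rw [if_neg hsn]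
        have hsn' : s < nums.length := by omega
        have hin : minK ≤ nums.getD s 0 ∧ nums.getD s 0 ≤ maxK := by
          by_contra hc
          exact hspec.2 ⟨hsn', hc⟩
        rw [pvInnerA_H nums minK maxK s c hsn' hin]
        rw [ih (s + 1) (by omega)]
        rw [← Finset.sum_Ico_consecutive _ hge hle, Finset.sum_eq_zero hzero]
        rw [Finset.sum_eq_sum_Ico_succ_bot hsn']
        ring
    · rw [pvOuterA, dif_neg hl]
      rw [Finset.Ico_eq_empty (by omega)]
      simp

-- the per-step increment equals the number of good left ends for right end i
theorem pvGr_formula (nums : List Int) (minK maxK : Int) (i : Nat) (_hi : i < nums.length) :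
    (pvGr nums minK maxK i : Int) =
      max 0 (min (pvLast (fun j => decide (nums.getD j 0 = minK)) (i + 1))
                 (pvLast (fun j => decide (nums.getD j 0 = maxK)) (i + 1)) -
             pvLast (fun j => decide (¬(minK ≤ nums.getD j 0 ∧ nums.getD j 0 ≤ maxK))) (i + 1)) := by
  set qm := fun j => decide (nums.getD j 0 = minK) with hqm
  set qM := fun j => decide (nums.getD j 0 = maxK) with hqM
  set qb := fun j => decide (¬(minK ≤ nums.getD j 0 ∧ nums.getD j 0 ≤ maxK)) with hqb
  set lm := pvLast qm (i + 1) with hlm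
  set lM := pvLast qM (i + 1) with hlM
  set lb := pvLast qb (i + 1) with hlb
  have hlm1 : -1 ≤ lm := pvLast_ge qm (i + 1)
  have hlM1 : -1 ≤ lM := pvLast_ge qM (i + 1)
  have hlb1 : -1 ≤ lb := pvLast_ge qb (i + 1)
  have hlm2 : lm < (i : Int) + 1 := by have := pvLast_lt qm (i + 1); push_cast at this ⊢; omega
  have hlM2 : lM < (i : Int) + 1 := by have := pvLast_lt qM (i + 1); push_cast at this ⊢; omega
  have hset : (Finset.range (i + 1)).filter (fun l => pvPb nums minK maxK l i = true) =
      Finset.Ico (lb + 1).toNat ((min lm lM) + 1).toNat := by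
    ext l
    simp only [Finset.mem_filter, Finset.mem_range, Finset.mem_Ico, pvPb, pvAllB, pvExB,
      Bool.and_eq_true, decide_eq_true_eq]
    constructor
    · rintro ⟨hli, ⟨hall, hmin⟩, hmax⟩
      have h1 : lb < (l : Int) := by
        by_contra hc
        push Not at hc
        have h0 : 0 ≤ lb := by omega
        obtain ⟨j, hj1, hj2, hj3⟩ := pvLast_mem qb (i + 1) h0
        rw [hqb] at hj2
        exact (decide_eq_true_eq.mp hj2) (hall j (Finset.mem_Icc.mpr (by omega)))
      have h2 : (l : Int) ≤ lm := by
        obtain ⟨j, hj1, hj2⟩ := hmin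
        rw [Finset.mem_Icc] at hj1
        have := pvLast_ge_of qm (i + 1) j (by omega) (by rw [hqm]; exact decide_eq_true_eq.mpr hj2)
        omega
      have h3 : (l : Int) ≤ lM := by
        obtain ⟨j, hj1, hj2⟩ := hmax
        rw [Finset.mem_Icc] at hj1
        have := pvLast_ge_of qM (i + 1) j (by omega) (by rw [hqM]; exact decide_eq_true_eq.mpr hj2)
        omega
      omega
    · rintro ⟨h1, h2⟩
      have h3 : lb < (l : Int) := by omega
      have h4 : (l : Int) ≤ lm := by omega
      have h5 : (l : Int) ≤ lM := by omega
      refine ⟨by omega, ⟨fun j hj => ?_, ?_⟩, ?_⟩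
      · simp only [Finset.mem_Icc] at hj
        by_contra hc
        have := pvLast_ge_of qb (i + 1) j (by omega) (by rw [hqb]; exact decide_eq_true_eq.mpr hc)
        omega
      · obtain ⟨j, hj1, hj2, hj3⟩ := pvLast_mem qm (i + 1) (by omega)
        refine ⟨j, Finset.mem_Icc.mpr (by omega), ?_⟩
        rw [hqm] at hj2
        exact decide_eq_true_eq.mp hj2
      · obtain ⟨j, hj1, hj2, hj3⟩ := pvLast_mem qM (i + 1) (by omega)
        refine ⟨j, Finset.mem_Icc.mpr (by omega), ?_⟩
        rw [hqM] at hj2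
        exact decide_eq_true_eq.mp hj2
  unfold pvGr
  rw [hset, Nat.card_Ico]
  omega

-- B's fold invariant over the first i elements
theorem pvFoldB_take (nums : List Int) (minK maxK : Int) :
    ∀ i, i ≤ nums.length →
      ((PySem.List.enumerate nums 0).take i).foldl (pvStepB minK maxK) (0, -1, -1, -1) =
      (∑ r ∈ Finset.range i, (pvGr nums minK maxK r : Int),
       pvLast (fun j => decide (nums.getD j 0 = minK)) i,
       pvLast (fun j => decide (nums.getD j 0 = maxK)) i,
       pvLast (fun j => decide (¬(minK ≤ nums.getD j 0 ∧ nums.getD j 0 ≤ maxK))) i) := by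
  intro i
  induction i with
  | zero =>
    intro _
    simp [pvLast]
  | succ i ih =>
    intro hi1
    have hi : i < nums.length := by omega
    have hgetE : (PySem.List.enumerate nums 0)[i]? = some ((0 : Int) + i, nums[i]) := by
      rw [PySem.List.getElem?_enumerate, List.getElem?_eq_getElem hi]
      rfl
    rw [List.take_add_one, List.foldl_append, ih (by omega), hgetE]
    have hg : nums[i] = nums.getD i 0 := (List.getD_eq_getElem nums 0 hi).symm
    simp only [Option.toList_some, List.foldl_cons, List.foldl_nil, pvStepB, hg]
    rw [Finset.sum_range_succ, pvGr_formula nums minK maxK i hi]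
    simp [pvLast, Prod.ext_iff]
    try (split_ifs <;> omega)

-- double counting: sum over left ends = sum over right ends
theorem pv_sum_swap (nums : List Int) (minK maxK : Int) :
    ∑ l ∈ Finset.range nums.length, pvH nums minK maxK l =
    ∑ r ∈ Finset.range nums.length, pvGr nums minK maxK r := by
  have hIco : ∀ l : Nat, Finset.Ico l nums.length = (Finset.range nums.length).filter (fun r => l ≤ r) := by
    intro l; ext r
    simp only [Finset.mem_Ico, Finset.mem_filter, Finset.mem_range]
    omega
  have hRange : ∀ r : Nat, r < nums.length → Finset.range (r + 1) = (Finset.range nums.length).filter (fun l => l ≤ r) := by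
    intro r hr; ext l
    simp only [Finset.mem_range, Finset.mem_filter]
    omega
  calc ∑ l ∈ Finset.range nums.length, pvH nums minK maxK l
      = ∑ l ∈ Finset.range nums.length, ∑ r ∈ Finset.range nums.length,
          (if l ≤ r ∧ pvPb nums minK maxK l r = true then 1 else 0) := by
        refine Finset.sum_congr rfl fun l _ => ?_
        unfold pvH
        rw [Finset.card_filter, hIco l, Finset.sum_filter]
        refine Finset.sum_congr rfl fun r _ => ?_
        by_cases h1 : l ≤ r <;> by_cases h2 : pvPb nums minK maxK l r = true <;> simp [h1, h2]
    _ = ∑ r ∈ Finset.range nums.length, ∑ l ∈ Finset.range nums.length,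
          (if l ≤ r ∧ pvPb nums minK maxK l r = true then 1 else 0) := Finset.sum_comm
    _ = ∑ r ∈ Finset.range nums.length, pvGr nums minK maxK r := by
        refine Finset.sum_congr rfl fun r hr => ?_
        unfold pvGr
        rw [Finset.card_filter, hRange r (Finset.mem_range.mp hr), Finset.sum_filter]
        refine Finset.sum_congr rfl fun l _ => ?_
        by_cases h1 : l ≤ r <;> by_cases h2 : pvPb nums minK maxK l r = true <;> simp [h1, h2]

-- ===== VERDICT (by name: the statement is the Claim_ definition above) =====
theorem countSubarraysBrute_spec : Claim_equal_countSubarraysBrute := by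
  intro nums minK maxK _
  unfold Spec_countSubarraysBrute countSubarraysBrute countSubarraysBrute_alt
  rw [pvOuterA_eq nums minK maxK 0 0]
  have hlen : (PySem.List.enumerate nums 0).length = nums.length :=
    PySem.List.length_enumerate nums 0
  have htake : PySem.List.enumerate nums 0 = (PySem.List.enumerate nums 0).take nums.length := by
    rw [← hlen, List.take_length]
  rw [htake, pvFoldB_take nums minK maxK nums.length (le_refl _)]
  rw [zero_add, ← Finset.range_eq_Ico]
  have hcast : (∑ l ∈ Finset.range nums.length, (pvH nums minK maxK l : Int)) =
      ((∑ l ∈ Finset.range nums.length, pvH nums minK maxK l : Nat) : Int) := by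
    push_cast
    rfl
  rw [hcast, pv_sum_swap]
  push_cast
  rfl
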